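-- pv_equiv track=rewrite | github.com/seacow-technology/agentos | agentos/core/executor_dry/commit_planner.py | _determine_tags
-- ===== SOURCE A (Python) =====
-- from typing import Any, Dict, List
--
-- def _determine_tags(files: List[str], risk: str) -> List[str]:
--     """Determine tags for commit."""
--     tags = []
--
--     if risk in ["high", "critical"]:
--         tags.append("security")
--
--     # Check file patterns
--     if any("test" in f for f in files):
--         tags.append("tests")
--     if any("doc" in f or ".md" in f for f in files):
--         tags.append("docs")
--     if any("db" in f or "migration" in f for f in files):
--         tags.append("data")
--
--     return tags or ["refactor"]
-- ===== SOURCE B (Python) =====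
-- def _determine_tags(files, risk):
--     """Determine tags for commit (single pass over files with flags)."""
--     has_test = has_doc = has_data = False
--     for f in files:
--         if not has_test and "test" in f:
--             has_test = True
--         if not has_doc and ("doc" in f or ".md" in f):
--             has_doc = True
--         if not has_data and ("db" in f or "migration" in f):
--             has_data = True
--         if has_test and has_doc and has_data:
--             break
--     tags = []
--     if risk in ("high", "critical"):
--         tags.append("security")
--     if has_test:
--         tags.append("tests")
--     if has_doc:
--         tags.append("docs")
--     if has_data:
--         tags.append("data")
--     return tags or ["refactor"]
-- ===== Notes on version B (the rewrite author's own statement) =====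
-- stated objective: alternative
-- what changed: Replaces the three separate any(...) scans over files with one single-pass loop maintaining three flags (with early break once all are set), then assembles the tags from the flags.
import Mathlib
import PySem

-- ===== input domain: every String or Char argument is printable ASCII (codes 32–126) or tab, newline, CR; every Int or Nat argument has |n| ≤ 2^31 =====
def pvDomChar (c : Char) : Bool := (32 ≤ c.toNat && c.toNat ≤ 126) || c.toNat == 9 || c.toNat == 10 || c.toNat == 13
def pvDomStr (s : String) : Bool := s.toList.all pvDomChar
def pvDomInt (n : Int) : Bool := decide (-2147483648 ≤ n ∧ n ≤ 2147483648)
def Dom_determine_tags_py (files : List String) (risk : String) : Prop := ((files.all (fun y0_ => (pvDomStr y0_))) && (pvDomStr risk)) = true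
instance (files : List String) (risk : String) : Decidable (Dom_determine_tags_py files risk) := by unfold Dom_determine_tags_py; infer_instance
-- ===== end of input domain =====

-- B replaces A's three separate any(...) scans over files with one single-pass
-- flag-maintaining loop (early break once all flags are set); same return value.

-- ===== PORT A =====
def determine_tags_py (files : List String) (risk : String) : List String :=
  let tags : List String := []
  let tags := if risk = "high" ∨ risk = "critical" then tags ++ ["security"] else tags
  let tags := if files.any (fun f => PySem.Str.isIn "test" f) then tags ++ ["tests"] else tags
  let tags := if files.any (fun f => PySem.Str.isIn "doc" f || PySem.Str.isIn ".md" f) then tags ++ ["docs"] else tags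
  let tags := if files.any (fun f => PySem.Str.isIn "db" f || PySem.Str.isIn "migration" f) then tags ++ ["data"] else tags
  if tags = [] then ["refactor"] else tags

-- ===== PORT B =====
-- single pass over files, maintaining (has_test, has_doc, has_data), breaking early
def pvAltLoop : List String → Bool → Bool → Bool → Bool × Bool × Bool
  | [], ht, hd, ha => (ht, hd, ha)
  | f :: fs, ht, hd, ha =>
    let ht := if !ht && PySem.Str.isIn "test" f then true else ht
    let hd := if !hd && (PySem.Str.isIn "doc" f || PySem.Str.isIn ".md" f) then true else hd
    let ha := if !ha && (PySem.Str.isIn "db" f || PySem.Str.isIn "migration" f) then true else ha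
    if ht && hd && ha then (ht, hd, ha) else pvAltLoop fs ht hd ha

def determine_tags_py_alt (files : List String) (risk : String) : List String :=
  let flags := pvAltLoop files false false false
  let tags : List String := []
  let tags := if risk = "high" ∨ risk = "critical" then tags ++ ["security"] else tags
  let tags := if flags.1 then tags ++ ["tests"] else tags
  let tags := if flags.2.1 then tags ++ ["docs"] else tags
  let tags := if flags.2.2 then tags ++ ["data"] else tags
  if tags = [] then ["refactor"] else tags

-- ===== PRECONDITION & SPEC =====
def Spec_determine_tags_py (files : List String) (risk : String) (out : List String) : Prop := out = determine_tags_py_alt files risk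
instance (files : List String) (risk : String) (out : List String) : Decidable (Spec_determine_tags_py files risk out) := by unfold Spec_determine_tags_py; infer_instance

-- ===== CLAIM (what is proved, stated in full; the proofs are below) =====
def Claim_equal_determine_tags_py : Prop := ∀ (files : List String) (risk : String), Dom_determine_tags_py files risk → Spec_determine_tags_py files risk (determine_tags_py files risk)

-- ===== LEMMAS AND PROOFS =====
theorem pvAltLoop_eq (files : List String) (ht hd ha : Bool) :
    pvAltLoop files ht hd ha =
      (ht || files.any (fun f => PySem.Str.isIn "test" f),
       hd || files.any (fun f => PySem.Str.isIn "doc" f || PySem.Str.isIn ".md" f),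
       ha || files.any (fun f => PySem.Str.isIn "db" f || PySem.Str.isIn "migration" f)) := by
  induction files generalizing ht hd ha with
  | nil => simp [pvAltLoop]
  | cons f fs ih =>
    simp only [pvAltLoop, List.any_cons]
    cases ht <;> cases hd <;> cases ha <;>
      cases h1 : PySem.Str.isIn "test" f <;>
      cases h2 : PySem.Str.isIn "doc" f || PySem.Str.isIn ".md" f <;>
      cases h3 : PySem.Str.isIn "db" f || PySem.Str.isIn "migration" f <;>
      simp [ih]

-- ===== VERDICT (by name: the statement is the Claim_ definition above) =====
theorem determine_tags_py_spec : Claim_equal_determine_tags_py := by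
  intro files risk _
  unfold Spec_determine_tags_py determine_tags_py determine_tags_py_alt
  simp [pvAltLoop_eq]
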